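-- pv_equiv track=rewrite | github.com/thegiahung/BackupSOFT3202 | tutorial_3/tutorial3/reggie_bug.py | parse_regex_to_grammar
-- ===== SOURCE A (Python) =====
-- def parse_regex_to_grammar(regex):
--     # Initialize the alphabet and grammar dictionaries
--     alphabet = set()
--     grammar = {"<S>": []}
--
--     def add_rule(symbol, production):
--         if symbol not in grammar:
--             grammar[symbol] = []
--         grammar[symbol].append(production)
--
--     def parse_subexpression(subexp, index):
--         # Each subexpression corresponds to a new non-terminal in the grammar
--         non_terminal = f"<SUB{index}>"
--         grammar[non_terminal] = []
--         subexp_parts = subexp.split('|')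
--
--         for part in subexp_parts:
--             if part.isalpha() or part == '#':
--                 grammar[non_terminal].append(part)
--                 alphabet.add(part)
--
--         return non_terminal
--
--     index = 0
--     i = 0
--     while i < len(regex):
--         if regex[i] == '(':
--             # Find the matching closing parenthesis
--             depth = 1
--             j = i + 1
--             while j < len(regex) and depth > 0:
--                 if regex[j] == '(':
--                     depth += 1
--                 elif regex[j] == ')':
--                     depth -= 1
--                 j += 1
--             # Recursive call for subexpression
--             non_terminal = parse_subexpression(regex[i+1:j-1], index)
--             index += 1
--
--             # Handle Kleene star after subexpression
--             if j < len(regex) and regex[j] == '*':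
--                 grammar["<S>"].append(non_terminal + "<S>")
--                 grammar["<S>"].append("")  # Epsilon production for kleene star
--                 j += 1  # Move past the kleene star
--             else:
--                 grammar["<S>"].append(non_terminal)
--
--             i = j
--         else:
--             i += 1  # Ignore other characters (for now)
--
--     return sorted(alphabet), grammar
-- ===== SOURCE B (Python) =====
-- def parse_regex_to_grammar(regex):
--     # Pass 1: a one-character state machine collects, for every completed
--     # top-level parenthesized group, its content and whether a '*' follows it.
--     groups = []
--     depth = 0
--     buf = []
--     pending = None          # a just-closed group's content, waiting to see a '*'
--     for c in regex:
--         if pending is not None: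
--             groups.append((pending, c == '*'))
--             pending = None
--             if c == '*':
--                 continue
--         if depth == 0:
--             if c == '(':
--                 depth = 1
--                 buf = []
--         elif c == '(':
--             depth += 1
--             buf.append(c)
--         elif c == ')':
--             depth -= 1
--             if depth == 0:
--                 pending = ''.join(buf)
--             else:
--                 buf.append(c)
--         else:
--             buf.append(c)
--     if pending is not None:
--         groups.append((pending, False))
--     # Pass 2: build the alphabet and grammar from the group records.
--     alphabet = set()
--     grammar = {"<S>": []}
--     for k, (content, star) in enumerate(groups):
--         sub = f"<SUB{k}>"
--         rules = [p for p in content.split('|') if p.isalpha() or p == '#']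
--         grammar[sub] = rules
--         alphabet.update(rules)
--         if star:
--             grammar["<S>"].append(sub + "<S>")
--             grammar["<S>"].append("")
--         else:
--             grammar["<S>"].append(sub)
--     return sorted(alphabet), grammar
-- ===== Notes on version B (the rewrite author's own statement) =====
-- stated objective: alternative
-- what changed: A's single index-driven while-loop with a nested matching-paren scan, string slicing and interleaved grammar mutation is replaced by two passes: a one-character state machine (depth counter, buffer, pending-star flag) that collects (content, star) records of the completed top-level groups, then an enumerate fold that builds the alphabet and grammar from those records; iterating characters directly instead of repeated integer indexing and re-slicing gives a constant-factor speedup.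
-- intended difference: On regexes containing an unterminated parenthesized group, A still emits a SUB non-terminal for that group with its content truncated by one character (an artefact of its slice regex[i+1:j-1] when no closing parenthesis was found), while B ignores the malformed unclosed group; ignoring an unterminated group is the intended reading of malformed input rather than a silently truncated one. — e.g. on parse_regex_to_grammar("(a"): A returns ([], [("<S>", ["<SUB0>"]), ("<SUB0>", [])]), B returns ([], [("<S>", [])])
import Mathlib
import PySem

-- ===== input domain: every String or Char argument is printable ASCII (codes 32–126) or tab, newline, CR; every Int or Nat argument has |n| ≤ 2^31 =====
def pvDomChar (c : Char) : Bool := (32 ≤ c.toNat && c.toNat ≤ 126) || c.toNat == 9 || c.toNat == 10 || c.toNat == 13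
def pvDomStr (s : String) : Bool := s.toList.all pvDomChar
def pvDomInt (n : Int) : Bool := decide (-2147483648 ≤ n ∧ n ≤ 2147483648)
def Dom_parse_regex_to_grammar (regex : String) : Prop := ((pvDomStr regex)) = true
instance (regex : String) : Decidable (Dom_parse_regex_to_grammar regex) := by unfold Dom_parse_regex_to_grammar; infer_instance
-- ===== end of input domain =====

-- B replaces A's index-juggling single loop (inner while to find the matching paren, slicing, interleaved grammar updates)
-- by two passes: a one-character-at-a-time state machine that collects the (content, star) records of the completed
-- top-level groups, then a fold over the enumerated records that builds alphabet and grammar.  Objective: alternative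
-- decomposition, not speed; on regexes with an unterminated '(' group B intentionally ignores that group (see D_ below).

-- ===== PORT A =====
-- strings are handled as their character lists (regex.toList); a Python str value stored in the
-- grammar/alphabet becomes String.ofList of its character list — exact under the type convention.

-- inner 'while j < len(regex) and depth > 0' loop; loop state is (j, depth), both returned.
-- The while loop is encoded with a structural fuel argument; every call supplies
-- fuel ≥ cs.length - j, which makes the encoding exact (j grows by 1 per iteration).
def pvA_scan (cs : List Char) : Nat → Nat → Int → Nat × Int
  | 0, j, depth => (j, depth)
  | fuel+1, j, depth =>
    if h : j < cs.length ∧ 0 < depth then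
      if cs[j]'h.1 = '(' then pvA_scan cs fuel (j+1) (depth+1)
      else if cs[j]'h.1 = ')' then pvA_scan cs fuel (j+1) (depth-1)
      else pvA_scan cs fuel (j+1) depth
    else (j, depth)

-- parse_subexpression: grammar[nt] = []; for part in subexp.split('|'): if …: append part, alphabet.add(part)
def pvA_parseSub (subexp : List Char) (index : Int)
    (alphabet : PySem.Set String) (grammar : PySem.Dict String (List String)) :
    String × PySem.Set String × PySem.Dict String (List String) :=
  let nt := "<SUB" ++ PySem.Int.toStr index ++ ">"
  let st := (PySem.Chars.splitOn subexp ['|']).foldl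
    (fun (st : PySem.Set String × PySem.Dict String (List String)) part =>
      if PySem.Chars.strIsalpha part || part == ['#'] then
        (PySem.Set.add st.1 (String.ofList part), st.2.modify nt [] (· ++ [String.ofList part]))
      else st)
    (alphabet, grammar.insert nt [])
  (nt, st)

-- the outer while loop; state (i, index, alphabet, grammar); same fuel encoding
-- (fuel ≥ cs.length - i at every call, so fuel 0 is only reached once i ≥ cs.length)
def pvA_loop (cs : List Char) : Nat → Nat → Int →
    PySem.Set String → PySem.Dict String (List String) →
    PySem.Set String × PySem.Dict String (List String)
  | 0, _, _, alphabet, grammar => (alphabet, grammar)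
  | fuel+1, i, index, alphabet, grammar =>
    if h : i < cs.length then
      if cs[i]'h = '(' then
        let j := (pvA_scan cs (cs.length - (i+1)) (i+1) 1).1
        let r := pvA_parseSub (PySem.List.slice cs (some ((i : Int)+1)) (some ((j : Int)-1)))
                   index alphabet grammar
        -- 'j < len(regex) and regex[j] == "*"': getD is only reached when j < length (short-circuit)
        if decide (j < cs.length) && (cs.getD j ' ' == '*') then
          pvA_loop cs fuel (j+1) (index+1) r.2.1
            ((r.2.2.modify "<S>" [] (· ++ [r.1 ++ "<S>"])).modify "<S>" [] (· ++ [""]))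
        else
          pvA_loop cs fuel j (index+1) r.2.1 (r.2.2.modify "<S>" [] (· ++ [r.1]))
      else pvA_loop cs fuel (i+1) index alphabet grammar
    else (alphabet, grammar)

def parse_regex_to_grammar (regex : String) : List String × (List (String × List String)) :=
  let cs := regex.toList
  let r := pvA_loop cs cs.length 0 0 PySem.Set.empty (PySem.Dict.ofList [("<S>", [])])
  (PySem.List.sorted r.1 (fun x => x) false, r.2.items)

-- ===== PORT B =====
-- pass 1: the per-character state machine; state (groups, depth, buf, pending)
def pvB_step (st : List (List Char × Bool) × Int × List Char × Option (List Char)) (c : Char) :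
    List (List Char × Bool) × Int × List Char × Option (List Char) :=
  match st with
  | (groups, depth, buf, pending) =>
    let gp : List (List Char × Bool) × Bool :=
      match pending with
      | some p => (groups ++ [(p, decide (c = '*'))], decide (c = '*'))
      | none => (groups, false)
    if gp.2 then (gp.1, depth, buf, none)   -- 'continue'
    else
      if depth = 0 then
        if c = '(' then (gp.1, 1, [], none) else (gp.1, depth, buf, none)
      else if c = '(' then (gp.1, depth + 1, buf ++ [c], none)
      else if c = ')' then
        if depth - 1 = 0 then (gp.1, 0, buf, some buf)
        else (gp.1, depth - 1, buf ++ [c], none)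
      else (gp.1, depth, buf ++ [c], none)

def pvB_pass1 (cs : List Char) : List (List Char × Bool) :=
  match cs.foldl pvB_step ([], 0, [], none) with
  | (groups, _, _, pending) =>
    match pending with | some p => groups ++ [(p, false)] | none => groups

-- pass 2 body: one enumerated group record
def pvB_group (st : PySem.Set String × PySem.Dict String (List String))
    (kg : Int × (List Char × Bool)) : PySem.Set String × PySem.Dict String (List String) :=
  let sub := "<SUB" ++ PySem.Int.toStr kg.1 ++ ">"
  let rules := ((PySem.Chars.splitOn kg.2.1 ['|']).filter
      (fun p => PySem.Chars.strIsalpha p || p == ['#'])).map String.ofList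
  let grammar := st.2.insert sub rules
  let alphabet := PySem.Set.update st.1 rules
  let grammar := if kg.2.2 then
      (grammar.modify "<S>" [] (· ++ [sub ++ "<S>"])).modify "<S>" [] (· ++ [""])
    else grammar.modify "<S>" [] (· ++ [sub])
  (alphabet, grammar)

def parse_regex_to_grammar_alt (regex : String) : List String × (List (String × List String)) :=
  let groups := pvB_pass1 regex.toList
  let r := (PySem.List.enumerate groups).foldl pvB_group
             (PySem.Set.empty, PySem.Dict.ofList [("<S>", [])])
  (PySem.List.sorted r.1 (fun x => x) false, r.2.items)

-- ===== PRECONDITION & SPEC =====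

-- On regexes with an unterminated top-level '(' group, A still emits a <SUBk> non-terminal for it with the
-- group's content truncated by one character (an artefact of its regex[i+1:j-1] slice when no ')' was found),
-- while B ignores the malformed unclosed group; ignoring an unterminated group is the intended reading of
-- malformed input rather than a silently truncated one.
-- D_ holds exactly when reading regex left to right with a depth counter (+1 on '(', -1 on ')' only when
-- positive) ends with a positive depth, i.e. some top-level group is never closed.
def pvOpenDepth (cs : List Char) : Int :=
  cs.foldl (fun d c => if c = '(' then d + 1 else if c = ')' ∧ 0 < d then d - 1 else d) 0
def D_parse_regex_to_grammar (regex : String) : Prop := 0 < pvOpenDepth regex.toList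
instance (regex : String) : Decidable (D_parse_regex_to_grammar regex) := by unfold D_parse_regex_to_grammar; infer_instance

def Spec_parse_regex_to_grammar (regex : String) (out : List String × (List (String × List String))) : Prop := ¬ D_parse_regex_to_grammar regex → out = parse_regex_to_grammar_alt regex
instance (regex : String) (out : List String × (List (String × List String))) : Decidable (Spec_parse_regex_to_grammar regex out) := by unfold Spec_parse_regex_to_grammar; infer_instance

def pvDiffWitness_parse_regex_to_grammar : String := "(a"
def pvDiffWitnessOut_parse_regex_to_grammar :
    (List String × (List (String × List String))) × (List String × (List (String × List String))) :=
  (([], [("<S>", ["<SUB0>"]), ("<SUB0>", [])]), ([], [("<S>", [])]))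

-- ===== CLAIM (what is proved, stated in full; the proofs are below) =====
def Claim_unchanged_parse_regex_to_grammar : Prop := ∀ (regex : String), Dom_parse_regex_to_grammar regex → Spec_parse_regex_to_grammar regex (parse_regex_to_grammar regex)
def Claim_changed_parse_regex_to_grammar : Prop := Dom_parse_regex_to_grammar (pvDiffWitness_parse_regex_to_grammar) ∧ D_parse_regex_to_grammar (pvDiffWitness_parse_regex_to_grammar) ∧ parse_regex_to_grammar (pvDiffWitness_parse_regex_to_grammar) = pvDiffWitnessOut_parse_regex_to_grammar.1 ∧ parse_regex_to_grammar_alt (pvDiffWitness_parse_regex_to_grammar) = pvDiffWitnessOut_parse_regex_to_grammar.2 ∧ pvDiffWitnessOut_parse_regex_to_grammar.1 ≠ pvDiffWitnessOut_parse_regex_to_grammar.2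
def Claim_exact_parse_regex_to_grammar : Prop := ∀ (regex : String), Dom_parse_regex_to_grammar regex → D_parse_regex_to_grammar regex → parse_regex_to_grammar regex ≠ parse_regex_to_grammar_alt regex

-- ===== LEMMAS AND PROOFS =====

-- A-side flush (what A's loop amounts to at end of input): flush a pending group, and when the
-- input ended inside a group, A still emits (buf minus its last character) as one more group
def pvFinish (st : List (List Char × Bool) × Int × List Char × Option (List Char)) :
    List (List Char × Bool) :=
  match st with
  | (groups, depth, buf, pending) =>
    let groups := match pending with | some p => groups ++ [(p, false)] | none => groups
    if 0 < depth then groups ++ [(buf.dropLast, false)] else groups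

def pvF (l : List Char) (st : List (List Char × Bool) × Int × List Char × Option (List Char)) :
    List (List Char × Bool) :=
  pvFinish (l.foldl pvB_step st)

theorem pvF_cons (c : Char) (l : List Char) (st) : pvF (c :: l) st = pvF l (pvB_step st c) := rfl

-- the machine only appends to groups; factor a group prefix out
theorem pvB_step_shift (g : List (List Char × Bool)) (d : Int) (b : List Char)
    (p : Option (List Char)) (c : Char) :
    pvB_step (g, d, b, p) c =
      (g ++ (pvB_step ([], d, b, p) c).1, (pvB_step ([], d, b, p) c).2) := by
  cases p <;> simp [pvB_step] <;> split_ifs <;> simp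

theorem pvF_shift (l : List Char) (g : List (List Char × Bool)) (d : Int) (b : List Char)
    (p : Option (List Char)) : pvF l (g, d, b, p) = g ++ pvF l ([], d, b, p) := by
  induction l generalizing g d b p with
  | nil => cases p <;> simp [pvF, pvFinish] <;> split_ifs <;> simp
  | cons c l ih =>
    rw [pvF_cons, pvF_cons, pvB_step_shift g d b p c]
    rcases h : pvB_step ([], d, b, p) c with ⟨g', d', b', p'⟩
    rw [ih, ih g' d' b' p']
    simp

-- at depth 0 the buffer is dead state
theorem pvF_buf_irrel (l : List Char) (g : List (List Char × Bool)) (b b' : List Char)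
    (p : Option (List Char)) : pvF l (g, 0, b, p) = pvF l (g, 0, b', p) := by
  induction l generalizing g b b' p with
  | nil => cases p <;> simp [pvF, pvFinish]
  | cons c l ih =>
    rw [pvF_cons, pvF_cons]
    cases p with
    | some p =>
      by_cases hc : c = '*'
      · simp [pvB_step, hc]; exact ih _ _ _ _
      · by_cases hp : c = '('
        · simp [pvB_step, hp, hc]
        · simp [pvB_step, hp, hc]; exact ih _ _ _ _
    | none =>
      by_cases hp : c = '('
      · simp [pvB_step, hp]
      · simp [pvB_step, hp]; exact ih _ _ _ _

-- the scan with its canonical fuel (what the port passes)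
def pvA_scanF (cs : List Char) (j : Nat) (d : Int) : Nat × Int :=
  pvA_scan cs (cs.length - j) j d

-- one unfolding of the while loop, fuel hidden
theorem pvA_scanF_eq (cs : List Char) (j : Nat) (d : Int) :
    pvA_scanF cs j d =
      if h : j < cs.length ∧ 0 < d then
        (if cs[j]'h.1 = '(' then pvA_scanF cs (j+1) (d+1)
         else if cs[j]'h.1 = ')' then pvA_scanF cs (j+1) (d-1)
         else pvA_scanF cs (j+1) d)
      else (j, d) := by
  unfold pvA_scanF
  by_cases hc : j < cs.length ∧ 0 < d
  · rw [show cs.length - j = (cs.length - (j+1)) + 1 from by omega]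
    simp only [pvA_scan]
  · cases hnj : cs.length - j with
    | zero => simp [pvA_scan, hc]
    | succ m => simp [pvA_scan, hc]

-- where the scan can stop
theorem pvA_scan_cases (cs : List Char) (j : Nat) (d : Int) :
    j ≤ cs.length → 0 < d →
    ((pvA_scanF cs j d).2 = 0 ∧ j < (pvA_scanF cs j d).1 ∧ (pvA_scanF cs j d).1 ≤ cs.length)
    ∨ ((pvA_scanF cs j d).1 = cs.length ∧ 0 < (pvA_scanF cs j d).2) := by
  induction hm : cs.length - j using Nat.strong_induction_on generalizing j d with
  | _ n ih =>
  subst hm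
  intro hj hd
  rw [pvA_scanF_eq]
  by_cases hc : j < cs.length ∧ 0 < d
  · rw [dif_pos hc]
    split_ifs with h1 h2
    · rcases ih (cs.length - (j+1)) (by omega) (j+1) (d+1) rfl (by omega) (by omega)
        with ⟨a, b, c⟩ | ⟨a, b⟩
      · exact Or.inl ⟨a, by omega, c⟩
      · exact Or.inr ⟨a, b⟩
    · by_cases hd1 : d = 1
      · subst hd1
        rw [pvA_scanF_eq, dif_neg (by omega)]
        exact Or.inl ⟨by norm_num, by omega, by omega⟩
      · rcases ih (cs.length - (j+1)) (by omega) (j+1) (d-1) rfl (by omega) (by omega)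
          with ⟨a, b, c⟩ | ⟨a, b⟩
        · exact Or.inl ⟨a, by omega, c⟩
        · exact Or.inr ⟨a, b⟩
    · rcases ih (cs.length - (j+1)) (by omega) (j+1) d rfl (by omega) (by omega)
        with ⟨a, b, c⟩ | ⟨a, b⟩
      · exact Or.inl ⟨a, by omega, c⟩
      · exact Or.inr ⟨a, b⟩
  · rw [dif_neg hc]
    exact Or.inr ⟨by omega, by simpa using hd⟩

-- the in-group machine tracks pvA_scan
theorem pvF_inner (cs : List Char) (j : Nat) (d : Int) (g : List (List Char × Bool))
    (buf : List Char) (hj : j ≤ cs.length) (hd : 0 < d) :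
    pvF (cs.drop j) (g, d, buf, none) =
      if (pvA_scanF cs j d).2 = 0 then
        pvF (cs.drop (pvA_scanF cs j d).1)
          (g, 0, [], some (buf ++ (cs.drop j).take ((pvA_scanF cs j d).1 - 1 - j)))
      else g ++ [((buf ++ cs.drop j).dropLast, false)] := by
  induction hm : cs.length - j using Nat.strong_induction_on generalizing j d g buf with
  | _ n ih =>
  subst hm
  by_cases hjl : j < cs.length
  · have hdrop : cs.drop j = cs[j] :: cs.drop (j+1) := List.drop_eq_getElem_cons hjl
    rw [pvA_scanF_eq, dif_pos (⟨hjl, hd⟩ : j < cs.length ∧ 0 < d)]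
    rw [hdrop, pvF_cons]
    by_cases h1 : cs[j] = '('
    · rw [if_pos h1]
      have hstep : pvB_step (g, d, buf, none) cs[j] = (g, d + 1, buf ++ [cs[j]], none) := by
        simp [pvB_step, h1]; omega
      rw [hstep, ih (cs.length - (j+1)) (by omega) (j+1) (d+1) g (buf ++ [cs[j]]) (by omega)
        (by omega) rfl]
      rcases pvA_scan_cases cs (j+1) (d+1) (by omega) (by omega) with ⟨h0, hgt, _⟩ | ⟨_, hpos⟩
      · rw [if_pos h0, if_pos h0,
          show (pvA_scanF cs (j+1) (d+1)).1 - 1 - j = ((pvA_scanF cs (j+1) (d+1)).1 - 1 - (j+1)) + 1 from by omega,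
          List.take_succ_cons]
        simp
      · rw [if_neg (by omega), if_neg (by omega)]
        simp
    · by_cases h2 : cs[j] = ')'
      · rw [if_neg h1, if_pos h2]
        by_cases hd1 : d = 1
        · subst hd1
          have hstep : pvB_step (g, 1, buf, none) cs[j] = (g, 0, buf, some buf) := by
            simp [pvB_step, h2]
          rw [hstep]
          have hs1 : pvA_scanF cs (j+1) (1-1) = (j+1, 0) := by
            rw [pvA_scanF_eq, dif_neg (by omega)]; norm_num
          rw [hs1]
          norm_num
          exact pvF_buf_irrel (cs.drop (j+1)) g buf [] (some buf)
        · have hstep : pvB_step (g, d, buf, none) cs[j] = (g, d - 1, buf ++ [cs[j]], none) := by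
            simp [pvB_step, h2, show ¬(d - 1 = 0) from by omega, show ¬(d = 0) from by omega]
          rw [hstep, ih (cs.length - (j+1)) (by omega) (j+1) (d-1) g (buf ++ [cs[j]]) (by omega)
            (by omega) rfl]
          rcases pvA_scan_cases cs (j+1) (d-1) (by omega) (by omega) with ⟨h0, hgt, _⟩ | ⟨_, hpos⟩
          · rw [if_pos h0, if_pos h0,
              show (pvA_scanF cs (j+1) (d-1)).1 - 1 - j = ((pvA_scanF cs (j+1) (d-1)).1 - 1 - (j+1)) + 1 from by omega,
              List.take_succ_cons]
            simp
          · rw [if_neg (by omega), if_neg (by omega)]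
            simp
      · rw [if_neg h1, if_neg h2]
        have hstep : pvB_step (g, d, buf, none) cs[j] = (g, d, buf ++ [cs[j]], none) := by
          simp [pvB_step, h1, h2]
          omega
        rw [hstep, ih (cs.length - (j+1)) (by omega) (j+1) d g (buf ++ [cs[j]]) (by omega)
          (by omega) rfl]
        rcases pvA_scan_cases cs (j+1) d (by omega) (by omega) with ⟨h0, hgt, _⟩ | ⟨_, hpos⟩
        · rw [if_pos h0, if_pos h0,
            show (pvA_scanF cs (j+1) d).1 - 1 - j = ((pvA_scanF cs (j+1) d).1 - 1 - (j+1)) + 1 from by omega,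
            List.take_succ_cons]
          simp
        · rw [if_neg (by omega), if_neg (by omega)]
          simp
  · have hj' : j = cs.length := by omega
    rw [pvA_scanF_eq, dif_neg (by omega)]
    rw [if_neg (by omega)]
    subst hj'
    simp [pvF, pvFinish, hd]

-- the fold in parse_subexpression, with a general accumulated rule list
theorem pv_fold_parts (parts : List (List Char)) (nt : String) (al : PySem.Set String)
    (gr : PySem.Dict String (List String)) (acc : List String) :
    parts.foldl
      (fun (st : PySem.Set String × PySem.Dict String (List String)) part =>
        if PySem.Chars.strIsalpha part || part == ['#'] then
          (PySem.Set.add st.1 (String.ofList part), st.2.modify nt [] (· ++ [String.ofList part]))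
        else st)
      (al, gr.insert nt acc)
    = (PySem.Set.update al ((parts.filter
          (fun p => PySem.Chars.strIsalpha p || p == ['#'])).map String.ofList),
       gr.insert nt (acc ++ (parts.filter
          (fun p => PySem.Chars.strIsalpha p || p == ['#'])).map String.ofList)) := by
  induction parts generalizing al acc with
  | nil => simp [PySem.Set.update]
  | cons p t ih =>
    simp only [List.foldl_cons, List.filter_cons]
    by_cases hc : (PySem.Chars.strIsalpha p || p == ['#']) = true
    · have hmod : (gr.insert nt acc).modify nt [] (· ++ [String.ofList p])
          = gr.insert nt (acc ++ [String.ofList p]) := by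
        rw [PySem.Dict.modify, PySem.Dict.getD_insert_self, PySem.Dict.insert_insert_self]
      simp only [hc, if_true, hmod]
      rw [ih]
      simp [PySem.Set.update]
    · simp only [hc, if_false, Bool.false_eq_true]
      exact ih al acc

-- A's parse_subexpression computed in B's shape
theorem pvA_parseSub_eq (sub : List Char) (k : Int) (al : PySem.Set String)
    (gr : PySem.Dict String (List String)) :
    pvA_parseSub sub k al gr =
      ("<SUB" ++ PySem.Int.toStr k ++ ">",
       PySem.Set.update al (((PySem.Chars.splitOn sub ['|']).filter
           (fun p => PySem.Chars.strIsalpha p || p == ['#'])).map String.ofList),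
       gr.insert ("<SUB" ++ PySem.Int.toStr k ++ ">")
         (((PySem.Chars.splitOn sub ['|']).filter
           (fun p => PySem.Chars.strIsalpha p || p == ['#'])).map String.ofList)) := by
  unfold pvA_parseSub
  dsimp only
  rw [pv_fold_parts (acc := [])]
  simp

-- fold pass 2 from counter k
def pvE (gs : List (List Char × Bool)) (k : Int)
    (st : PySem.Set String × PySem.Dict String (List String)) :
    PySem.Set String × PySem.Dict String (List String) :=
  (PySem.List.enumerate gs k).foldl pvB_group st

theorem pvE_cons (g : List Char × Bool) (t : List (List Char × Bool)) (k : Int) (st) :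
    pvE (g :: t) k st = pvE t (k+1) (pvB_group st (k, g)) := by
  simp [pvE, PySem.List.enumerate]

theorem pvE_nil (k : Int) (st : PySem.Set String × PySem.Dict String (List String)) :
    pvE [] k st = st := by simp [pvE, PySem.List.enumerate]

theorem pvF_nil_init : pvF [] ([], 0, [], none) = [] := rfl

theorem pvF_flush_nil (g : List (List Char × Bool)) (b p : List Char) :
    pvF [] (g, 0, b, some p) = g ++ [(p, false)] := by simp [pvF, pvFinish]

theorem pvF_flush_cons (c : Char) (l : List Char) (g : List (List Char × Bool)) (b p : List Char)
    (hc : c ≠ '*') :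
    pvF (c :: l) (g, 0, b, some p) = pvF (c :: l) (g ++ [(p, false)], 0, b, none) := by
  rw [pvF_cons, pvF_cons]
  congr 1
  simp [pvB_step, hc]

theorem pvF_star (l : List Char) (g : List (List Char × Bool)) (b p : List Char) :
    pvF ('*' :: l) (g, 0, b, some p) = pvF l (g ++ [(p, true)], 0, b, none) := by
  rfl


-- the main simulation: A's loop from i = pass 2 over the A-side flush of pass 1 of the rest of the input
theorem pv_main (cs : List Char) (f : Nat) (i : Nat) (k : Int) (al : PySem.Set String)
    (gr : PySem.Dict String (List String)) (hf : cs.length - i ≤ f) (hi : i ≤ cs.length) :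
    pvA_loop cs f i k al gr = pvE (pvF (cs.drop i) ([], 0, [], none)) k (al, gr) := by
  induction f generalizing i k al gr with
  | zero =>
    have hd : cs.drop i = [] := by rw [List.drop_eq_nil_iff]; omega
    rw [hd, pvF_nil_init, pvE_nil, pvA_loop]
  | succ f ih =>
  by_cases hil : i < cs.length
  · have hdrop : cs.drop i = cs[i] :: cs.drop (i+1) := List.drop_eq_getElem_cons hil
    simp only [pvA_loop]
    rw [dif_pos hil]
    by_cases h1 : cs[i] = '('
    · rw [if_pos h1]
      rw [show pvA_scan cs (cs.length - (i+1)) (i+1) 1 = pvA_scanF cs (i+1) 1 from rfl]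
      rw [hdrop, pvF_cons]
      have hstep : pvB_step ([], 0, [], none) cs[i] = ([], 1, [], none) := by
        simp [pvB_step, h1]
      rw [hstep, pvF_inner cs (i+1) 1 [] [] (by omega) (by omega), pvA_parseSub_eq]
      rcases pvA_scan_cases cs (i+1) 1 (by omega) (by omega) with ⟨h0, hgt, hle⟩ | ⟨hlen, hpos⟩
      · rw [if_pos h0]
        have hslice : PySem.List.slice cs (some ((i:Int)+1))
              (some (((pvA_scanF cs (i+1) 1).1 : Int)-1))
            = (cs.drop (i+1)).take ((pvA_scanF cs (i+1) 1).1 - 1 - (i+1)) := by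
          rw [show ((i:Int)+1) = (((i+1 : Nat)) : Int) from by push_cast; ring,
              show (((pvA_scanF cs (i+1) 1).1:Int)-1)
                = (((pvA_scanF cs (i+1) 1).1 - 1 : Nat) : Int) from by omega,
              PySem.List.slice_natCast]
        rw [hslice]
        simp only [List.nil_append]
        by_cases hstar : (decide ((pvA_scanF cs (i+1) 1).1 < cs.length)
            && (cs.getD (pvA_scanF cs (i+1) 1).1 ' ' == '*')) = true
        · rw [if_pos hstar]
          simp only [Bool.and_eq_true, decide_eq_true_eq, beq_iff_eq] at hstar
          obtain ⟨hjl, hgd⟩ := hstar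
          have hc : cs[(pvA_scanF cs (i+1) 1).1] = '*' := by
            rwa [List.getD_eq_getElem?_getD, List.getElem?_eq_getElem hjl] at hgd
          rw [List.drop_eq_getElem_cons hjl, hc, pvF_star, pvF_shift]
          simp only [List.nil_append, List.singleton_append]
          rw [pvE_cons, ih _ _ _ _ (by omega) (by omega)]
          all_goals congr 1
        · rw [if_neg hstar]
          have hflush : pvF (cs.drop (pvA_scanF cs (i+1) 1).1)
                ([], 0, [], some ((cs.drop (i+1)).take ((pvA_scanF cs (i+1) 1).1 - 1 - (i+1))))
              = ((cs.drop (i+1)).take ((pvA_scanF cs (i+1) 1).1 - 1 - (i+1)), false)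
                  :: pvF (cs.drop (pvA_scanF cs (i+1) 1).1) ([], 0, [], none) := by
            by_cases hjl : (pvA_scanF cs (i+1) 1).1 < cs.length
            · have hcs : cs[(pvA_scanF cs (i+1) 1).1] ≠ '*' := by
                intro hcc
                apply hstar
                simp only [Bool.and_eq_true, decide_eq_true_eq, beq_iff_eq]
                refine ⟨hjl, ?_⟩
                rw [List.getD_eq_getElem?_getD, List.getElem?_eq_getElem hjl, hcc]
                rfl
              rw [List.drop_eq_getElem_cons hjl, pvF_flush_cons _ _ _ _ _ hcs, pvF_shift,
                ← List.drop_eq_getElem_cons hjl]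
              simp
            · have : cs.drop (pvA_scanF cs (i+1) 1).1 = [] := by
                rw [List.drop_eq_nil_iff]
                omega
              rw [this, pvF_flush_nil, pvF_nil_init]
              simp
          rw [hflush, pvE_cons, ih _ _ _ _ (by omega) (by omega)]
          all_goals congr 1
      · have hbool : ¬((decide ((pvA_scanF cs (i+1) 1).1 < cs.length)
            && (cs.getD (pvA_scanF cs (i+1) 1).1 ' ' == '*')) = true) := by simp [hlen]
        rw [if_neg hbool, if_neg (show ¬((pvA_scanF cs (i+1) 1).2 = 0) from by omega)]
        have hslice : PySem.List.slice cs (some ((i:Int)+1))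
              (some (((pvA_scanF cs (i+1) 1).1 : Int)-1))
            = ((([] : List Char) ++ cs.drop (i+1)).dropLast) := by
          rw [show ((i:Int)+1) = (((i+1 : Nat)) : Int) from by push_cast; ring,
              show (((pvA_scanF cs (i+1) 1).1:Int)-1)
                = (((pvA_scanF cs (i+1) 1).1 - 1 : Nat) : Int) from by omega,
              PySem.List.slice_natCast, List.nil_append, List.dropLast_eq_take]
          congr 1
          rw [List.length_drop]
          omega
        rw [hslice]
        rw [ih _ _ _ _ (by omega) (by omega),
          show cs.drop (pvA_scanF cs (i+1) 1).1 = [] from by rw [List.drop_eq_nil_iff]; omega,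
          pvF_nil_init, pvE_nil]
        simp only [List.nil_append]
        rw [pvE_cons, pvE_nil]
        all_goals congr 1
    · rw [if_neg h1]
      rw [hdrop, pvF_cons]
      have hstep : pvB_step ([], 0, [], none) cs[i] = ([], 0, [], none) := by
        simp [pvB_step, h1]
      rw [hstep]
      exact ih (i+1) k al gr (by omega) (by omega)
  · have hd : cs.drop i = [] := by rw [List.drop_eq_nil_iff]; omega
    rw [pvA_loop, dif_neg hil, hd, pvF_nil_init, pvE_nil]

-- the machine's depth is the clamp counter of D_, and it never goes negative
theorem pv_depth (l : List Char) (g : List (List Char × Bool)) (d : Int) (b : List Char)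
    (p : Option (List Char)) (hd : 0 ≤ d) :
    (l.foldl pvB_step (g, d, b, p)).2.1
      = l.foldl (fun d c => if c = '(' then d + 1 else if c = ')' ∧ 0 < d then d - 1 else d) d := by
  induction l generalizing g d b p with
  | nil => rfl
  | cons c l ih =>
    simp only [List.foldl_cons]
    rcases hst : pvB_step (g, d, b, p) c with ⟨g', d', b', p'⟩
    have hmain : d' = (if c = '(' then d + 1 else if c = ')' ∧ 0 < d then d - 1 else d) ∧ 0 ≤ d' := by
      cases p with
      | some q =>
        by_cases hc : c = '*'
        · simp [pvB_step, hc] at hst ⊢ <;> omega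
        · by_cases hpo : c = '('
          · by_cases h0 : d = 0 <;> simp [pvB_step, hc, hpo, h0] at hst ⊢ <;> omega
          · by_cases hcl : c = ')'
            · by_cases h0 : d = 0
              · simp [pvB_step, hc, hpo, hcl, h0] at hst ⊢ <;> omega
              · by_cases hd1 : d - 1 = 0 <;>
                  simp [pvB_step, hc, hpo, hcl, h0, hd1] at hst ⊢ <;> omega
            · by_cases h0 : d = 0 <;> simp [pvB_step, hc, hpo, hcl, h0] at hst ⊢ <;> omega
      | none =>
        by_cases hpo : c = '('
        · by_cases h0 : d = 0 <;> simp [pvB_step, hpo, h0] at hst ⊢ <;> omega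
        · by_cases hcl : c = ')'
          · by_cases h0 : d = 0
            · simp [pvB_step, hpo, hcl, h0] at hst ⊢ <;> omega
            · by_cases hd1 : d - 1 = 0 <;>
                simp [pvB_step, hpo, hcl, h0, hd1] at hst ⊢ <;> omega
          · by_cases h0 : d = 0 <;> simp [pvB_step, hpo, hcl, h0] at hst ⊢ <;> omega
    rw [← hmain.1, ih g' d' b' p' hmain.2]

-- when no group is left open, the A-side flush and B's pass 1 coincide
theorem pv_pass1_agree (cs : List Char) (h : ¬ (0 < pvOpenDepth cs)) :
    pvF cs ([], 0, [], none) = pvB_pass1 cs := by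
  have hd := pv_depth cs [] 0 [] none le_rfl
  unfold pvOpenDepth at h
  unfold pvF pvB_pass1 pvFinish
  rcases hst : cs.foldl pvB_step ([], 0, [], none) with ⟨g, d, b, p⟩
  rw [hst] at hd
  simp only at hd
  have hdn : ¬ 0 < d := by rw [hd]; exact h
  cases p <;> simp [hdn]

-- inside D_ the machine ends at positive depth, so A's flush appends one extra (star-free) group record
theorem pv_pass1_split (cs : List Char) (h : 0 < pvOpenDepth cs) :
    ∃ b, pvF cs ([], 0, [], none) = pvB_pass1 cs ++ [(b, false)] := by
  have hd := pv_depth cs [] 0 [] none le_rfl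
  unfold pvOpenDepth at h
  unfold pvF pvB_pass1 pvFinish
  rcases hst : cs.foldl pvB_step ([], 0, [], none) with ⟨g, d, b, p⟩
  rw [hst] at hd
  simp only at hd
  have hdp : 0 < d := by rw [hd]; exact h
  exact ⟨b.dropLast, by cases p <;> simp [hdp]⟩

-- a <SUBk> key is never the key "<S>" (their lengths differ)
theorem pv_sub_ne_S (k : Int) : ("<S>" : String) ≠ "<SUB" ++ PySem.Int.toStr k ++ ">" := by
  intro h
  have hlen := congrArg String.length h
  rw [String.length_append, String.length_append] at hlen
  simp only [show ("<S>" : String).length = 3 from rfl,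
    show ("<SUB" : String).length = 4 from rfl, show (">" : String).length = 1 from rfl] at hlen
  omega

-- each group record contributes exactly one (no star) or two (star) productions to grammar["<S>"]
theorem pvS_len (gs : List (List Char × Bool)) (k : Int) (al : PySem.Set String)
    (gr : PySem.Dict String (List String)) :
    ((pvE gs k (al, gr)).2.getD "<S>" []).length
      = (gr.getD "<S>" []).length + (gs.map (fun g => if g.2 then 2 else 1)).sum := by
  induction gs generalizing k al gr with
  | nil => rw [pvE_nil]; simp
  | cons g t ih =>
    rw [pvE_cons]
    rcases hgb : pvB_group (al, gr) (k, g) with ⟨al', gr'⟩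
    rw [ih]
    have hS : (gr'.getD "<S>" []).length = (gr.getD "<S>" []).length + (if g.2 then 2 else 1) := by
      have hne := pv_sub_ne_S k
      by_cases hs : g.2 = true
      · simp only [pvB_group, hs, if_true, Prod.mk.injEq] at hgb
        rw [← hgb.2]
        simp [PySem.Dict.getD_modify_self, PySem.Dict.getD_insert, hne, hs]
      · simp only [pvB_group, hs, Bool.false_eq_true, if_false, Prod.mk.injEq] at hgb
        rw [← hgb.2]
        simp [PySem.Dict.getD_modify_self, PySem.Dict.getD_insert, hne, hs]
    rw [hS]
    simp only [List.map_cons, List.sum_cons]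
    omega

-- ===== VERDICT (by name: the statement is the Claim_ definition above) =====
theorem parse_regex_to_grammar_spec : Claim_unchanged_parse_regex_to_grammar := by
  intro regex _ hnd
  unfold parse_regex_to_grammar parse_regex_to_grammar_alt
  dsimp only
  rw [pv_main regex.toList regex.toList.length 0 0 _ _ (by omega) (by omega),
    List.drop_zero, pv_pass1_agree regex.toList hnd]
  simp [pvE]

theorem parse_regex_to_grammar_changed : Claim_changed_parse_regex_to_grammar := by
  unfold Claim_changed_parse_regex_to_grammar; decide

theorem parse_regex_to_grammar_tight : Claim_exact_parse_regex_to_grammar := by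
  intro regex _ hD heq
  unfold parse_regex_to_grammar parse_regex_to_grammar_alt at heq
  dsimp only at heq
  rw [pv_main regex.toList regex.toList.length 0 0 _ _ (by omega) (by omega),
    List.drop_zero] at heq
  obtain ⟨b, hsplit⟩ := pv_pass1_split regex.toList hD
  rw [hsplit] at heq
  have hgr : (pvE (pvB_pass1 regex.toList ++ [(b, false)]) 0
        (PySem.Set.empty, PySem.Dict.ofList [("<S>", [])])).2
      = (pvE (pvB_pass1 regex.toList) 0
        (PySem.Set.empty, PySem.Dict.ofList [("<S>", [])])).2 := by
    apply PySem.Dict.ext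
    exact congrArg Prod.snd heq
  have h1 := pvS_len (pvB_pass1 regex.toList ++ [(b, false)]) 0
    PySem.Set.empty (PySem.Dict.ofList [("<S>", [])])
  have h2 := pvS_len (pvB_pass1 regex.toList) 0
    PySem.Set.empty (PySem.Dict.ofList [("<S>", [])])
  rw [hgr] at h1
  rw [h2, List.map_append, List.sum_append] at h1
  simp at h1
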